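-- pv_equiv track=rewrite | github.com/juntizhang/NUS_IT5001_PE_Practical_Exam_Solution | Solution in py/2022_Sem2.py | max_island_perimeter
-- ===== SOURCE A (Python) =====
-- def count_sides(map_mat,row,col):
--     up,low,left,right = 0,0,0,0
--     if row == 0: up = 1
--     if row == len(map_mat)-1: low = 1
--     if col == 0: left = 1
--     if col == len(map_mat[0])-1: right = 1
--
--     if not up:
--         if map_mat[row-1][col] == 0: up = 1
--     if not low:
--         if map_mat[row+1][col] == 0: low = 1
--     if not left:
--         if map_mat[row][col-1] == 0: left = 1
--     if not right:
--         if map_mat[row][col+1] == 0: right = 1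
--     return up+low+left+right
--
-- def find_islands(matrix):
--     if not matrix: return []
--     rows, cols = len(matrix), len(matrix[0])
--     visited = [[False for _ in range(cols)] for _ in range(rows)]
--
--     def search_adjacent(r, c, current_island):
--         if r < 0 or r >= rows or c < 0 or c >= cols or visited[r][c] or matrix[r][c] == 0:
--             return
--         visited[r][c] = True
--         current_island.append((r, c))
--         search_adjacent(r-1, c, current_island)
--         search_adjacent(r+1, c, current_island)
--         search_adjacent(r, c-1, current_island)
--         search_adjacent(r, c+1, current_island)
--
--     islands = []
--     for r in range(rows):
--         for c in range(cols):
--             if matrix[r][c] == 1 and not visited[r][c]: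
--                 current_island = []
--                 search_adjacent(r, c, current_island)
--                 islands.append(current_island)
--     return islands
--
-- def max_island_perimeter(mp):
--     islands = find_islands(mp)
--     perimeter = []
--     for i in islands:
--         count = 0
--         for j in i:
--             count += count_sides(mp,j[0],j[1])
--         perimeter.append(count)
--     return max(perimeter)
-- ===== SOURCE B (Python) =====
-- def max_island_perimeter(mp):
--     rows = len(mp)
--     cols = len(mp[0]) if mp else 0
--     visited = set()
--     perimeters = []
--     for r in range(rows):
--         for c in range(cols):
--             if mp[r][c] == 1 and (r, c) not in visited:
--                 per = 0
--                 stack = [(r, c)]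
--                 while stack:
--                     x, y = stack.pop()
--                     if x < 0 or x >= rows or y < 0 or y >= cols or (x, y) in visited or mp[x][y] == 0:
--                         continue
--                     visited.add((x, y))
--                     per += 4
--                     for nx, ny in ((x, y + 1), (x, y - 1), (x + 1, y), (x - 1, y)):
--                         if 0 <= nx < rows and 0 <= ny < cols and mp[nx][ny] != 0:
--                             per -= 1
--                         stack.append((nx, ny))
--                 perimeters.append(per)
--     return max(perimeters)
-- ===== Notes on version B (the rewrite author's own statement) =====
-- stated objective: alternative
-- what changed: Replaces A's recursive island-collecting DFS (per-island cell lists whose perimeters are summed afterwards via count_sides) by an explicit-stack flood fill over a visited set that accumulates each island's perimeter inline (4 minus the count of in-bounds non-zero neighbours), building no intermediate island cell lists; Pre_ excludes the inputs on which A raises (ragged rows reached by the scan, and empty or land-free grids where max([]) raises).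
-- outside the precondition, e.g. on max_island_perimeter([]): A raises ValueError, B raises ValueError; on max_island_perimeter([[0, 1], [1]]): A raises IndexError, B raises IndexError
import Mathlib
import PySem

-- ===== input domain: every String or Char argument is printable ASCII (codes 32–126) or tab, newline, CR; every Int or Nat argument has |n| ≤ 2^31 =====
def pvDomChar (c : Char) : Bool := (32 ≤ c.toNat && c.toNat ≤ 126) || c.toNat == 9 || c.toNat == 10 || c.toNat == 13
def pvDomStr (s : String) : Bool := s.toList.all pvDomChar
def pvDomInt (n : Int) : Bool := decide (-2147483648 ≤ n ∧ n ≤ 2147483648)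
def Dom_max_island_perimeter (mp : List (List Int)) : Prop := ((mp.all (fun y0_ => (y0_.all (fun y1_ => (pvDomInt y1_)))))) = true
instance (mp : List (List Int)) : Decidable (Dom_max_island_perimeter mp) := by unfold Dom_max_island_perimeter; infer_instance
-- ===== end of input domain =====

-- B replaces A's recursive island-collecting DFS by an explicit-stack flood fill over a visited
-- set that accumulates each island's perimeter inline (4 minus in-bounds non-zero neighbours),
-- building no island cell lists (objective: alternative decomposition, same asymptotic cost).

-- ===== PORT A =====
-- mp[r][c] for in-range Nat indices (exact on Pre_: every access is in range there)
def pvIdx (mp : List (List Int)) (r c : Nat) : Int := (mp.getD r []).getD c 0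

-- visited[r][c] on the rows×cols Bool grid
def pvGetVis (g : List (List Bool)) (r c : Nat) : Bool := (g.getD r []).getD c false

-- visited[r][c] = True
def pvSetVis (g : List (List Bool)) (r c : Nat) : List (List Bool) :=
  g.set r ((g.getD r []).set c true)

-- count_sides: row/col are the Nat coordinates of an island cell (row+1 = len ↔ Python's row == len-1)
def count_sides (mp : List (List Int)) (row col : Nat) : Int :=
  let up : Int := if row = 0 then 1 else 0
  let low : Int := if row + 1 = mp.length then 1 else 0
  let left : Int := if col = 0 then 1 else 0
  let right : Int := if col + 1 = (mp.headD []).length then 1 else 0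
  let up := if up = 0 then (if pvIdx mp (row - 1) col = 0 then 1 else up) else up
  let low := if low = 0 then (if pvIdx mp (row + 1) col = 0 then 1 else low) else low
  let left := if left = 0 then (if pvIdx mp row (col - 1) = 0 then 1 else left) else left
  let right := if right = 0 then (if pvIdx mp row (col + 1) = 0 then 1 else right) else right
  up + low + left + right

-- search_adjacent: fuel only totalises the recursion (rows*cols+1 always suffices, proved below)
def search_adjacent (mp : List (List Int)) (rows cols : Nat) (fuel : Nat) (r c : Int)
    (g : List (List Bool)) (isl : List (Nat × Nat)) : List (List Bool) × List (Nat × Nat) :=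
  match fuel with
  | 0 => (g, isl)
  | f + 1 =>
    if r < 0 ∨ (rows : Int) ≤ r ∨ c < 0 ∨ (cols : Int) ≤ c then (g, isl)
    else if pvGetVis g r.toNat c.toNat then (g, isl)
    else if pvIdx mp r.toNat c.toNat = 0 then (g, isl)
    else
      let g1 := pvSetVis g r.toNat c.toNat
      let i1 := isl ++ [(r.toNat, c.toNat)]
      let p2 := search_adjacent mp rows cols f (r - 1) c g1 i1
      let p3 := search_adjacent mp rows cols f (r + 1) c p2.1 p2.2
      let p4 := search_adjacent mp rows cols f r (c - 1) p3.1 p3.2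
      search_adjacent mp rows cols f r (c + 1) p4.1 p4.2

def find_islands (mp : List (List Int)) : List (List (Nat × Nat)) :=
  if mp = [] then []
  else
    let rows := mp.length
    let cols := (mp.headD []).length
    let init : List (List Bool) := List.replicate rows (List.replicate cols false)
    ((List.range rows).foldl (fun st r =>
      (List.range cols).foldl (fun (st : List (List Bool) × List (List (Nat × Nat))) c =>
        if pvIdx mp r c = 1 ∧ pvGetVis st.1 r c = false then
          let p := search_adjacent mp rows cols (rows * cols + 1) (r : Int) (c : Int) st.1 []
          (p.1, st.2 ++ [p.2])
        else st) st) (init, [])).2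

def max_island_perimeter (mp : List (List Int)) : Int :=
  let islands := find_islands mp
  let perimeter := islands.foldl (fun acc i =>
    acc ++ [i.foldl (fun cnt j => cnt + count_sides mp j.1 j.2) 0]) []
  -- Python max(perimeter) raises ValueError on []: excluded by Pre_; default 0 outside Pre_
  (PySem.List.max? perimeter (fun x => x)).getD 0

-- ===== PORT B =====
-- the in-bounds grid cells, for flood's termination measure
def pvAllCells (rows cols : Nat) : List (Int × Int) :=
  (List.range rows).flatMap (fun r => (List.range cols).map (fun c => ((r : Int), (c : Int))))

-- number of in-bounds cells not yet visited
def pvFree (rows cols : Nat) (vis : PySem.Set (Int × Int)) : Nat :=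
  ((pvAllCells rows cols).filter (fun p => ! PySem.Set.contains vis p)).length

lemma mem_pvAllCells (rows cols : Nat) (x y : Int) :
    (x, y) ∈ pvAllCells rows cols ↔ 0 ≤ x ∧ x < (rows : Int) ∧ 0 ≤ y ∧ y < (cols : Int) := by
  simp [pvAllCells, List.mem_flatMap, List.mem_map, List.mem_range, Prod.ext_iff]
  constructor
  · rintro ⟨⟨r, hr, h1⟩, c, hc, h2⟩
    omega
  · rintro ⟨h1, h2, h3, h4⟩
    exact ⟨⟨x.toNat, by omega, by omega⟩, ⟨y.toNat, by omega, by omega⟩⟩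

-- a filter that implies another and misses an element of it is strictly shorter
lemma filter_length_lt {α : Type} (l : List α) (p q : α → Bool)
    (himp : ∀ a, q a = true → p a = true) (a : α) (ha : a ∈ l)
    (hap : p a = true) (haq : q a = false) :
    (l.filter q).length < (l.filter p).length := by
  induction l with
  | nil => simp at ha
  | cons x t ih =>
    rcases List.mem_cons.1 ha with rfl | hmem
    · rw [List.filter_cons, List.filter_cons, hap, haq]
      simp only [if_true]
      have : (t.filter q).length ≤ (t.filter p).length :=
        (List.monotone_filter_right t (fun a h => himp a h)).length_le
      simp
      omega
    · rw [List.filter_cons, List.filter_cons]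
      by_cases hq : q x = true
      · rw [hq, himp x hq]
        simpa using ih hmem
      · have hq' : q x = false := by simpa using hq
        rw [hq']
        by_cases hp : p x = true
        · rw [hp]
          simp
          have := ih hmem
          omega
        · simp only [Bool.not_eq_true] at hp
          rw [hp]
          simpa using ih hmem

lemma pvFree_add_lt (rows cols : Nat) (vis : PySem.Set (Int × Int)) (x y : Int)
    (hx : 0 ≤ x) (hx2 : x < (rows : Int)) (hy : 0 ≤ y) (hy2 : y < (cols : Int))
    (hc : PySem.Set.contains vis (x, y) = false) :
    pvFree rows cols (PySem.Set.add vis (x, y)) < pvFree rows cols vis := by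
  refine filter_length_lt _ _ _ ?_ (x, y) ?_ ?_ ?_
  · intro a hq
    simp only [Bool.not_eq_eq_eq_not, Bool.not_true] at hq ⊢
    revert hq
    simp [pysem]
    tauto
  · exact (mem_pvAllCells rows cols x y).mpr ⟨hx, hx2, hy, hy2⟩
  · simp only [Bool.not_eq_eq_eq_not, Bool.not_true]
    exact hc
  · have hnm : (x, y) ∉ vis := fun hm => by
      have : PySem.Set.contains vis (x, y) = true := by simp [pysem, hm]
      rw [this] at hc
      cases hc
    simp [pysem, hnm]

-- the while-loop: pop, skip or mark-and-expand (stack top is the list head)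
def flood (mp : List (List Int)) (rows cols : Nat) (stack : List (Int × Int))
    (vis : PySem.Set (Int × Int)) (per : Int) : PySem.Set (Int × Int) × Int :=
  match stack with
  | [] => (vis, per)
  | (x, y) :: rest =>
    if h : x < 0 ∨ (rows : Int) ≤ x ∨ y < 0 ∨ (cols : Int) ≤ y ∨
           PySem.Set.contains vis (x, y) = true ∨ pvIdx mp x.toNat y.toNat = 0 then
      flood mp rows cols rest vis per
    else
      let vis1 := PySem.Set.add vis (x, y)
      let st := [((x, y + 1) : Int × Int), (x, y - 1), (x + 1, y), (x - 1, y)].foldl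
        (fun (s : Int × List (Int × Int)) n =>
          (if 0 ≤ n.1 ∧ n.1 < (rows : Int) ∧ 0 ≤ n.2 ∧ n.2 < (cols : Int) ∧
              pvIdx mp n.1.toNat n.2.toNat ≠ 0 then s.1 - 1 else s.1,
           n :: s.2)) (per + 4, rest)
      flood mp rows cols st.2 vis1 st.1
termination_by (pvFree rows cols vis, stack.length)
decreasing_by
  · apply Prod.Lex.right; simp
  · apply Prod.Lex.left
    push Not at h
    exact pvFree_add_lt rows cols vis x y (by omega) (by omega) (by omega) (by omega)
      (by simpa using h.2.2.2.2.1)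

def max_island_perimeter_alt (mp : List (List Int)) : Int :=
  let rows := mp.length
  let cols := if mp = [] then 0 else (mp.headD []).length
  let fin := (List.range rows).foldl (fun st r =>
    (List.range cols).foldl (fun (st : PySem.Set (Int × Int) × List Int) c =>
      if pvIdx mp r c = 1 ∧ PySem.Set.contains st.1 ((r : Int), (c : Int)) = false then
        let p := flood mp rows cols [((r : Int), (c : Int))] st.1 0
        (p.1, st.2 ++ [p.2])
      else st) st) (PySem.Set.empty, [])
  -- Python max(perimeters) raises ValueError on []: excluded by Pre_; default 0 outside Pre_
  (PySem.List.max? fin.2 (fun x => x)).getD 0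

-- ===== PRECONDITION & SPEC =====
-- Pre_ excludes exactly the inputs on which the Python A raises: an IndexError when some row is
-- shorter than row 0 (the scan reads matrix[r][c] for every c < len(matrix[0])), and the
-- ValueError of max([]) when the grid is empty or contains no cell equal to 1.
def Pre_max_island_perimeter (mp : List (List Int)) : Prop :=
  mp ≠ [] ∧ (∀ row ∈ mp, (mp.headD []).length ≤ row.length) ∧
  ∃ r < mp.length, ∃ c < (mp.headD []).length, pvIdx mp r c = 1

instance (mp : List (List Int)) : Decidable (Pre_max_island_perimeter mp) := by
  unfold Pre_max_island_perimeter; infer_instance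

def pvWitness_max_island_perimeter : List (List Int) := [[1, 0], [0, 1]]

def Spec_max_island_perimeter (mp : List (List Int)) (out : Int) : Prop := out = max_island_perimeter_alt mp
instance (mp : List (List Int)) (out : Int) : Decidable (Spec_max_island_perimeter mp out) := by unfold Spec_max_island_perimeter; infer_instance

-- ===== CLAIM (what is proved, stated in full; the proofs are below) =====
def Claim_equal_max_island_perimeter : Prop := ∀ (mp : List (List Int)), Dom_max_island_perimeter mp → Pre_max_island_perimeter mp → Spec_max_island_perimeter mp (max_island_perimeter mp)

-- ===== LEMMAS AND PROOFS =====

-- the visited grid keeps its rows×cols shape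
def GridOk (rows cols : Nat) (g : List (List Bool)) : Prop :=
  g.length = rows ∧ ∀ row ∈ g, row.length = cols

-- A's visited grid and B's visited set agree on every in-bounds cell
def VisRel (rows cols : Nat) (g : List (List Bool)) (vis : PySem.Set (Int × Int)) : Prop :=
  ∀ r < rows, ∀ c < cols, pvGetVis g r c = PySem.Set.contains vis ((r : Int), (c : Int))

-- A's perimeter of one island list
def pvPerim (mp : List (List Int)) (i : List (Nat × Nat)) : Int :=
  i.foldl (fun cnt j => cnt + count_sides mp j.1 j.2) 0

-- number of unvisited cells in A's grid
def pvFreeG (rows cols : Nat) (g : List (List Bool)) : Nat :=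
  ((pvAllCells rows cols).filter (fun p => ! pvGetVis g p.1.toNat p.2.toNat)).length

lemma getD_set {α : Type} (l : List α) (i j : Nat) (a d : α) :
    (l.set i a).getD j d = if i = j ∧ i < l.length then a else l.getD j d := by
  simp [List.getD_eq_getElem?_getD, List.getElem?_set]
  split_ifs with h1 h2 h3 <;> simp_all
  omega

lemma getVis_setVis (g : List (List Bool)) (r c r' c' : Nat) :
    pvGetVis (pvSetVis g r c) r' c'
      = if r' = r ∧ c' = c ∧ r < g.length ∧ c < (g.getD r []).length then true
        else pvGetVis g r' c' := by
  unfold pvGetVis pvSetVis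
  rw [getD_set]
  by_cases h1 : r = r' ∧ r < g.length
  · obtain ⟨he, hlt⟩ := h1
    subst he
    rw [if_pos ⟨rfl, hlt⟩, getD_set]
    by_cases h2 : c = c' ∧ c < (g.getD r []).length
    · obtain ⟨he2, hclt⟩ := h2
      subst he2
      rw [if_pos ⟨rfl, hclt⟩, if_pos ⟨rfl, rfl, hlt, hclt⟩]
    · rw [if_neg h2, if_neg (fun hcon => h2 ⟨hcon.2.1.symm, hcon.2.2.2⟩)]
  · rw [if_neg h1, if_neg (fun hcon => h1 ⟨hcon.1.symm, hcon.2.2.1⟩)]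

lemma gridOk_setVis (rows cols : Nat) (g : List (List Bool)) (r c : Nat)
    (h : GridOk rows cols g) : GridOk rows cols (pvSetVis g r c) := by
  obtain ⟨h1, h2⟩ := h
  constructor
  · simp [pvSetVis, h1]
  · intro row hrow
    by_cases hrlen : r < g.length
    · rcases List.mem_or_eq_of_mem_set hrow with hm | rfl
      · exact h2 _ hm
      · have hmem : g.getD r [] ∈ g := by
          rw [List.getD_eq_getElem?_getD, List.getElem?_eq_getElem hrlen]
          exact List.getElem_mem _
        have hl : ((g.getD r []).set c true).length = cols := by
          rw [List.length_set]
          exact h2 _ hmem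
        exact hl
    · rw [pvSetVis, List.set_eq_of_length_le (by omega)] at hrow
      exact h2 _ hrow

lemma freeG_le (rows cols : Nat) (g : List (List Bool)) : pvFreeG rows cols g ≤ rows * cols := by
  have h1 : (pvAllCells rows cols).length = rows * cols := by
    simp [pvAllCells, List.length_flatMap]
  calc ((pvAllCells rows cols).filter _).length ≤ (pvAllCells rows cols).length :=
        List.length_filter_le _ _
    _ = rows * cols := h1

lemma freeG_setVis_lt (rows cols : Nat) (g : List (List Bool)) (r c : Nat)
    (hok : GridOk rows cols g) (hr : r < rows) (hc : c < cols)
    (hv : pvGetVis g r c = false) :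
    pvFreeG rows cols (pvSetVis g r c) < pvFreeG rows cols g := by
  have hrlen : r < g.length := by rw [hok.1]; exact hr
  have hclen : c < (g.getD r []).length := by
    have hmem : g.getD r [] ∈ g := by
      rw [List.getD_eq_getElem?_getD, List.getElem?_eq_getElem hrlen]
      exact List.getElem_mem _
    rw [hok.2 _ hmem]
    exact hc
  refine filter_length_lt _ _ _ ?_ ((r : Int), (c : Int)) ?_ ?_ ?_
  · intro a hq
    simp only [Bool.not_eq_eq_eq_not, Bool.not_true] at hq ⊢
    rw [getVis_setVis] at hq
    split_ifs at hq
    exact hq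
  · exact (mem_pvAllCells rows cols (r : Int) (c : Int)).mpr (by constructor <;> omega)
  · simp only [Bool.not_eq_eq_eq_not, Int.toNat_natCast]
    exact hv
  · simp only [Bool.not_eq_eq_eq_not, Int.toNat_natCast]
    rw [getVis_setVis, if_pos ⟨rfl, rfl, hrlen, hclen⟩]
    rfl

lemma freeG_mono_setVis (rows cols : Nat) (g : List (List Bool)) (r c : Nat) :
    pvFreeG rows cols (pvSetVis g r c) ≤ pvFreeG rows cols g := by
  apply List.Sublist.length_le
  apply List.monotone_filter_right
  intro p hp
  simp only [Bool.not_eq_eq_eq_not, Bool.not_true] at hp ⊢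
  rw [getVis_setVis] at hp
  split_ifs at hp
  exact hp

lemma search_mono (mp : List (List Int)) (rows cols fuel : Nat) :
    ∀ (r c : Int) g isl, pvFreeG rows cols (search_adjacent mp rows cols fuel r c g isl).1 ≤ pvFreeG rows cols g := by
  induction fuel with
  | zero => intro r c g isl; simp [search_adjacent]
  | succ f ih =>
    intro r c g isl
    rw [search_adjacent]
    split_ifs with h1 h2 h3
    · exact le_rfl
    · exact le_rfl
    · exact le_rfl
    · exact le_trans (ih _ _ _ _)
        (le_trans (ih _ _ _ _)
          (le_trans (ih _ _ _ _)
            (le_trans (ih _ _ _ _) (freeG_mono_setVis rows cols g r.toNat c.toNat))))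

lemma search_acc (mp : List (List Int)) (rows cols fuel : Nat) :
    ∀ (r c : Int) g isl,
      search_adjacent mp rows cols fuel r c g isl
        = ((search_adjacent mp rows cols fuel r c g []).1,
           isl ++ (search_adjacent mp rows cols fuel r c g []).2) := by
  induction fuel with
  | zero => intro r c g isl; simp [search_adjacent]
  | succ f ih =>
    intro r c g isl
    rw [search_adjacent, search_adjacent]
    split_ifs with h1 h2 h3
    · simp
    · simp
    · simp
    · dsimp only
      set G1 := pvSetVis g r.toNat c.toNat with hG1
      set A := isl ++ [(r.toNat, c.toNat)] with hA
      set B := ([] : List (Nat × Nat)) ++ [(r.toNat, c.toNat)] with hB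
      rw [ih (r - 1) c G1 A, ih (r - 1) c G1 B]
      dsimp only
      set q2 := search_adjacent mp rows cols f (r - 1) c G1 [] with hq2
      rw [ih (r + 1) c q2.1 (A ++ q2.2), ih (r + 1) c q2.1 (B ++ q2.2)]
      dsimp only
      set q3 := search_adjacent mp rows cols f (r + 1) c q2.1 [] with hq3
      rw [ih r (c - 1) q3.1 (A ++ q2.2 ++ q3.2), ih r (c - 1) q3.1 (B ++ q2.2 ++ q3.2)]
      dsimp only
      set q4 := search_adjacent mp rows cols f r (c - 1) q3.1 [] with hq4
      rw [ih r (c + 1) q4.1 (A ++ q2.2 ++ q3.2 ++ q4.2), ih r (c + 1) q4.1 (B ++ q2.2 ++ q3.2 ++ q4.2)]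
      simp [hA, hB, List.append_assoc]

-- relational fold
lemma foldl_rel {α β γ : Type} (R : α → β → Prop) (f : α → γ → α) (g : β → γ → β)
    (l : List γ) :
    ∀ a b, R a b → (∀ a' b' x, x ∈ l → R a' b' → R (f a' x) (g b' x)) →
      R (l.foldl f a) (l.foldl g b) := by
  induction l with
  | nil => intro a b h _; simpa using h
  | cons x t ih =>
    intro a b h hstep
    simp only [List.foldl_cons]
    exact ih _ _ (hstep a b x (List.mem_cons_self) h)
      (fun a' b' y hy => hstep a' b' y (List.mem_cons_of_mem _ hy))

lemma perim_append (mp : List (List Int)) (a b : List (Nat × Nat)) :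
    pvPerim mp (a ++ b) = pvPerim mp a + pvPerim mp b := by
  unfold pvPerim
  rw [PySem.List.foldl_add, PySem.List.foldl_add, PySem.List.foldl_add,
      List.map_append, List.sum_append]
  ring

lemma ite_collapse (b : Prop) [Decidable b] (v : Int) :
    (if (if b then (1:Int) else 0) = 0 then (if v = 0 then (1:Int) else (if b then (1:Int) else 0))
     else (if b then (1:Int) else 0))
    = if b then 1 else if v = 0 then 1 else 0 := by
  by_cases hb : b <;> simp [hb]

lemma count_sides_eq (mp : List (List Int)) (rn cn : Nat) :
    count_sides mp rn cn
      = (if rn = 0 then 1 else if pvIdx mp (rn - 1) cn = 0 then 1 else 0)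
        + (if rn + 1 = mp.length then 1 else if pvIdx mp (rn + 1) cn = 0 then 1 else 0)
        + (if cn = 0 then 1 else if pvIdx mp rn (cn - 1) = 0 then 1 else 0)
        + (if cn + 1 = (mp.headD []).length then 1 else if pvIdx mp rn (cn + 1) = 0 then 1 else 0) := by
  unfold count_sides
  dsimp only
  rw [ite_collapse, ite_collapse, ite_collapse, ite_collapse]

lemma side_up (mp : List (List Int)) (rn cn : Nat) (hr : rn < mp.length) (hc : cn < (mp.headD []).length) :
    (if 0 ≤ (rn : Int) - 1 ∧ (rn : Int) - 1 < (mp.length : Int) ∧ 0 ≤ (cn : Int) ∧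
        (cn : Int) < ((mp.headD []).length : Int) ∧ pvIdx mp ((rn : Int) - 1).toNat ((cn : Int)).toNat ≠ 0
     then (1:Int) else 0)
    = 1 - (if rn = 0 then 1 else if pvIdx mp (rn - 1) cn = 0 then 1 else 0) := by
  by_cases h0 : rn = 0
  · rw [if_neg (by rintro ⟨hh, _⟩; omega)]
    simp [h0]
  · have ht : ((rn : Int) - 1).toNat = rn - 1 := by omega
    rw [ht, Int.toNat_natCast]
    by_cases hz : pvIdx mp (rn - 1) cn = 0
    · rw [if_neg (by rintro ⟨_, _, _, _, h5⟩; exact h5 hz)]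
      simp [h0, hz]
    · rw [if_pos ⟨by omega, by omega, by omega, by omega, hz⟩]
      simp [h0, hz]

lemma side_down (mp : List (List Int)) (rn cn : Nat) (hr : rn < mp.length) (hc : cn < (mp.headD []).length) :
    (if 0 ≤ (rn : Int) + 1 ∧ (rn : Int) + 1 < (mp.length : Int) ∧ 0 ≤ (cn : Int) ∧
        (cn : Int) < ((mp.headD []).length : Int) ∧ pvIdx mp ((rn : Int) + 1).toNat ((cn : Int)).toNat ≠ 0
     then (1:Int) else 0)
    = 1 - (if rn + 1 = mp.length then 1 else if pvIdx mp (rn + 1) cn = 0 then 1 else 0) := by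
  have ht : ((rn : Int) + 1).toNat = rn + 1 := by omega
  rw [ht, Int.toNat_natCast]
  by_cases h0 : rn + 1 = mp.length
  · rw [if_neg (by rintro ⟨_, hh, _⟩; omega)]
    simp [h0]
  · by_cases hz : pvIdx mp (rn + 1) cn = 0
    · rw [if_neg (by rintro ⟨_, _, _, _, h5⟩; exact h5 hz)]
      simp [h0, hz]
    · rw [if_pos ⟨by omega, by omega, by omega, by omega, hz⟩]
      simp [h0, hz]

lemma side_left (mp : List (List Int)) (rn cn : Nat) (hr : rn < mp.length) (hc : cn < (mp.headD []).length) :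
    (if 0 ≤ (rn : Int) ∧ (rn : Int) < (mp.length : Int) ∧ 0 ≤ (cn : Int) - 1 ∧
        (cn : Int) - 1 < ((mp.headD []).length : Int) ∧ pvIdx mp ((rn : Int)).toNat ((cn : Int) - 1).toNat ≠ 0
     then (1:Int) else 0)
    = 1 - (if cn = 0 then 1 else if pvIdx mp rn (cn - 1) = 0 then 1 else 0) := by
  by_cases h0 : cn = 0
  · rw [if_neg (by rintro ⟨_, _, hh, _⟩; omega)]
    simp [h0]
  · have ht : ((cn : Int) - 1).toNat = cn - 1 := by omega
    rw [ht, Int.toNat_natCast]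
    by_cases hz : pvIdx mp rn (cn - 1) = 0
    · rw [if_neg (by rintro ⟨_, _, _, _, h5⟩; exact h5 hz)]
      simp [h0, hz]
    · rw [if_pos ⟨by omega, by omega, by omega, by omega, hz⟩]
      simp [h0, hz]

lemma side_right (mp : List (List Int)) (rn cn : Nat) (hr : rn < mp.length) (hc : cn < (mp.headD []).length) :
    (if 0 ≤ (rn : Int) ∧ (rn : Int) < (mp.length : Int) ∧ 0 ≤ (cn : Int) + 1 ∧
        (cn : Int) + 1 < ((mp.headD []).length : Int) ∧ pvIdx mp ((rn : Int)).toNat ((cn : Int) + 1).toNat ≠ 0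
     then (1:Int) else 0)
    = 1 - (if cn + 1 = (mp.headD []).length then 1 else if pvIdx mp rn (cn + 1) = 0 then 1 else 0) := by
  have ht : ((cn : Int) + 1).toNat = cn + 1 := by omega
  rw [ht, Int.toNat_natCast]
  by_cases h0 : cn + 1 = (mp.headD []).length
  · rw [if_neg (by rintro ⟨_, _, _, hh, _⟩; omega)]
    simp [h0]
  · by_cases hz : pvIdx mp rn (cn + 1) = 0
    · rw [if_neg (by rintro ⟨_, _, _, _, h5⟩; exact h5 hz)]
      rw [if_neg h0, if_pos hz]
      norm_num
    · rw [if_pos ⟨by omega, by omega, by omega, by omega, hz⟩]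
      rw [if_neg h0, if_neg hz]
      norm_num

lemma pv_ite_sub (c : Prop) [Decidable c] (s : Int) :
    (if c then s - 1 else s) = s - (if c then 1 else 0) := by
  split_ifs <;> ring

lemma visRel_mark (rows cols : Nat) (g : List (List Bool)) (vis : PySem.Set (Int × Int))
    (rn cn : Nat) (hok : GridOk rows cols g) (hr : rn < rows) (hc : cn < cols)
    (hrel : VisRel rows cols g vis) :
    VisRel rows cols (pvSetVis g rn cn) (PySem.Set.add vis ((rn : Int), (cn : Int))) := by
  intro r' hr' c' hc'
  rw [getVis_setVis]
  have hrlen : rn < g.length := by rw [hok.1]; exact hr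
  have hclen : cn < (g.getD rn []).length := by
    have hmem : g.getD rn [] ∈ g := by
      rw [List.getD_eq_getElem?_getD, List.getElem?_eq_getElem hrlen]
      exact List.getElem_mem _
    rw [hok.2 _ hmem]; exact hc
  by_cases he : r' = rn ∧ c' = cn
  · obtain ⟨rfl, rfl⟩ := he
    rw [if_pos ⟨rfl, rfl, hrlen, hclen⟩]
    have hm : ((r' : Int), (c' : Int)) ∈ PySem.Set.add vis ((r' : Int), (c' : Int)) := by
      simp [pysem]
    simp [pysem, hm]
  · rw [if_neg (fun hcon => he ⟨hcon.1, hcon.2.1⟩)]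
    rw [hrel r' hr' c' hc']
    have hne : ((r' : Int), (c' : Int)) ≠ ((rn : Int), (cn : Int)) := by
      rw [Ne, Prod.mk.injEq]
      rintro ⟨ha, hb⟩
      exact he ⟨by omega, by omega⟩
    by_cases hq : ((r' : Int), (c' : Int)) ∈ vis <;> simp [pysem, hq, hne]

-- the main bisimulation: one recursive DFS call of A ≙ processing one pushed cell of B
lemma bisim (mp : List (List Int)) :
    ∀ (fuel : Nat) (g : List (List Bool)) (vis : PySem.Set (Int × Int)),
      GridOk mp.length (mp.headD []).length g →
      VisRel mp.length (mp.headD []).length g vis →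
      pvFreeG mp.length (mp.headD []).length g < fuel →
      ∀ (x y : Int) (st : List (Int × Int)) (per : Int),
        ∃ vis',
          flood mp mp.length (mp.headD []).length ((x, y) :: st) vis per
            = flood mp mp.length (mp.headD []).length st vis'
                (per + pvPerim mp (search_adjacent mp mp.length (mp.headD []).length fuel x y g []).2)
          ∧ GridOk mp.length (mp.headD []).length (search_adjacent mp mp.length (mp.headD []).length fuel x y g []).1
          ∧ VisRel mp.length (mp.headD []).length (search_adjacent mp mp.length (mp.headD []).length fuel x y g []).1 vis' := by
  intro fuel
  induction fuel with
  | zero => intro g vis hok hrel hfree; omega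
  | succ f ih =>
    intro g vis hok hrel hfree x y st per
    by_cases hb : x < 0 ∨ (mp.length : Int) ≤ x ∨ y < 0 ∨ ((mp.headD []).length : Int) ≤ y
    · refine ⟨vis, ?_, ?_, ?_⟩
      · conv_lhs => rw [flood]
        rw [dif_pos (by tauto)]
        rw [search_adjacent, if_pos hb]
        simp [pvPerim]
      · rw [search_adjacent, if_pos hb]; exact hok
      · rw [search_adjacent, if_pos hb]; exact hrel
    · push Not at hb
      obtain ⟨hx0, hx1, hy0, hy1⟩ := hb
      obtain ⟨rn, rfl⟩ : ∃ n : Nat, x = (n : Int) := ⟨x.toNat, by omega⟩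
      obtain ⟨cn, rfl⟩ : ∃ n : Nat, y = (n : Int) := ⟨y.toNat, by omega⟩
      have hrn : rn < mp.length := by omega
      have hcn : cn < (mp.headD []).length := by omega
      have hnb : ¬((rn : Int) < 0 ∨ (mp.length : Int) ≤ (rn : Int) ∨ (cn : Int) < 0 ∨
          ((mp.headD []).length : Int) ≤ (cn : Int)) := by omega
      by_cases hv : pvGetVis g rn cn = true
      · -- already visited: both sides skip
        have hcont : PySem.Set.contains vis ((rn : Int), (cn : Int)) = true := by
          rw [← hrel rn hrn cn hcn]; exact hv
        refine ⟨vis, ?_, ?_, ?_⟩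
        · conv_lhs => rw [flood]
          rw [dif_pos (by right; right; right; right; left; exact hcont)]
          rw [search_adjacent, if_neg hnb]
          simp only [Int.toNat_natCast]
          rw [if_pos hv]
          simp [pvPerim]
        · rw [search_adjacent, if_neg hnb]
          simp only [Int.toNat_natCast]
          rw [if_pos hv]
          exact hok
        · rw [search_adjacent, if_neg hnb]
          simp only [Int.toNat_natCast]
          rw [if_pos hv]
          exact hrel
      · have hvf : pvGetVis g rn cn = false := by simpa using hv
        have hcont : PySem.Set.contains vis ((rn : Int), (cn : Int)) = false := by
          rw [← hrel rn hrn cn hcn]; exact hvf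
        by_cases hz : pvIdx mp rn cn = 0
        · -- water: both sides skip
          refine ⟨vis, ?_, ?_, ?_⟩
          · conv_lhs => rw [flood]
            rw [dif_pos (by right; right; right; right; right; simpa [Int.toNat_natCast] using hz)]
            rw [search_adjacent, if_neg hnb]
            simp only [Int.toNat_natCast]
            rw [if_neg hv, if_pos hz]
            simp [pvPerim]
          · rw [search_adjacent, if_neg hnb]
            simp only [Int.toNat_natCast]
            rw [if_neg hv, if_pos hz]
            exact hok
          · rw [search_adjacent, if_neg hnb]
            simp only [Int.toNat_natCast]
            rw [if_neg hv, if_pos hz]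
            exact hrel
        · -- land: mark the cell, push the four neighbours / recurse on them
          have hguard : ¬((rn : Int) < 0 ∨ (mp.length : Int) ≤ (rn : Int) ∨ (cn : Int) < 0 ∨
              ((mp.headD []).length : Int) ≤ (cn : Int) ∨
              PySem.Set.contains vis ((rn : Int), (cn : Int)) = true ∨
              pvIdx mp ((rn : Int)).toNat ((cn : Int)).toNat = 0) := by
            push Not
            refine ⟨by omega, by omega, by omega, by omega,
              by simp only [Bool.not_eq_true]; exact hcont, ?_⟩
            simpa [Int.toNat_natCast] using hz
          have hBstep : flood mp mp.length (mp.headD []).length (((rn : Int), (cn : Int)) :: st) vis per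
              = flood mp mp.length (mp.headD []).length
                  (((rn : Int) - 1, (cn : Int)) :: ((rn : Int) + 1, (cn : Int)) ::
                   ((rn : Int), (cn : Int) - 1) :: ((rn : Int), (cn : Int) + 1) :: st)
                  (PySem.Set.add vis ((rn : Int), (cn : Int)))
                  (per + count_sides mp rn cn) := by
            conv_lhs => rw [flood]
            rw [dif_neg hguard]
            simp only [List.foldl_cons, List.foldl_nil]
            simp only [pv_ite_sub]
            rw [side_right mp rn cn hrn hcn, side_left mp rn cn hrn hcn,
                side_down mp rn cn hrn hcn, side_up mp rn cn hrn hcn]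
            congr 1
            rw [count_sides_eq]
            ring
          -- unfold A one step and normalise the four chained calls to []-island form
          rw [search_adjacent, if_neg hnb]
          simp only [Int.toNat_natCast]
          rw [if_neg hv, if_neg hz]
          set G1 := pvSetVis g rn cn with hG1
          rw [search_acc mp mp.length (mp.headD []).length f ((rn : Int) - 1) (cn : Int) G1 ([] ++ [(rn, cn)])]
          dsimp only
          set q2 := search_adjacent mp mp.length (mp.headD []).length f ((rn : Int) - 1) (cn : Int) G1 [] with hq2
          rw [search_acc mp mp.length (mp.headD []).length f ((rn : Int) + 1) (cn : Int) q2.1 (([] ++ [(rn, cn)]) ++ q2.2)]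
          dsimp only
          set q3 := search_adjacent mp mp.length (mp.headD []).length f ((rn : Int) + 1) (cn : Int) q2.1 [] with hq3
          rw [search_acc mp mp.length (mp.headD []).length f (rn : Int) ((cn : Int) - 1) q3.1 ((([] ++ [(rn, cn)]) ++ q2.2) ++ q3.2)]
          dsimp only
          set q4 := search_adjacent mp mp.length (mp.headD []).length f (rn : Int) ((cn : Int) - 1) q3.1 [] with hq4
          rw [search_acc mp mp.length (mp.headD []).length f (rn : Int) ((cn : Int) + 1) q4.1 (((([] ++ [(rn, cn)]) ++ q2.2) ++ q3.2) ++ q4.2)]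
          dsimp only
          set q5 := search_adjacent mp mp.length (mp.headD []).length f (rn : Int) ((cn : Int) + 1) q4.1 [] with hq5
          -- invariants after marking
          have hok1 : GridOk mp.length (mp.headD []).length G1 := gridOk_setVis _ _ g rn cn hok
          have hrel1 : VisRel mp.length (mp.headD []).length G1 (PySem.Set.add vis ((rn : Int), (cn : Int))) :=
            visRel_mark _ _ g vis rn cn hok hrn hcn hrel
          have hfree1 : pvFreeG mp.length (mp.headD []).length G1 < f := by
            rw [hG1]
            have h1 := freeG_setVis_lt mp.length (mp.headD []).length g rn cn hok hrn hcn hvf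
            omega
          obtain ⟨vis2, he2, hok2, hrel2⟩ := ih G1 (PySem.Set.add vis ((rn : Int), (cn : Int))) hok1 hrel1 hfree1
            ((rn : Int) - 1) (cn : Int)
            (((rn : Int) + 1, (cn : Int)) :: ((rn : Int), (cn : Int) - 1) :: ((rn : Int), (cn : Int) + 1) :: st)
            (per + count_sides mp rn cn)
          rw [← hq2] at he2 hok2 hrel2
          obtain ⟨vis3, he3, hok3, hrel3⟩ := ih q2.1 vis2 hok2 hrel2
            (lt_of_le_of_lt (search_mono mp mp.length (mp.headD []).length f _ _ _ _) hfree1)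
            ((rn : Int) + 1) (cn : Int)
            (((rn : Int), (cn : Int) - 1) :: ((rn : Int), (cn : Int) + 1) :: st)
            (per + count_sides mp rn cn + pvPerim mp q2.2)
          rw [← hq3] at he3 hok3 hrel3
          obtain ⟨vis4, he4, hok4, hrel4⟩ := ih q3.1 vis3 hok3 hrel3
            (lt_of_le_of_lt (le_trans (search_mono mp mp.length (mp.headD []).length f _ _ _ _)
              (search_mono mp mp.length (mp.headD []).length f _ _ _ _)) hfree1)
            (rn : Int) ((cn : Int) - 1)
            (((rn : Int), (cn : Int) + 1) :: st)
            (per + count_sides mp rn cn + pvPerim mp q2.2 + pvPerim mp q3.2)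
          rw [← hq4] at he4 hok4 hrel4
          obtain ⟨vis5, he5, hok5, hrel5⟩ := ih q4.1 vis4 hok4 hrel4
            (lt_of_le_of_lt (le_trans (search_mono mp mp.length (mp.headD []).length f _ _ _ _)
              (le_trans (search_mono mp mp.length (mp.headD []).length f _ _ _ _)
                (search_mono mp mp.length (mp.headD []).length f _ _ _ _))) hfree1)
            (rn : Int) ((cn : Int) + 1) st
            (per + count_sides mp rn cn + pvPerim mp q2.2 + pvPerim mp q3.2 + pvPerim mp q4.2)
          rw [← hq5] at he5 hok5 hrel5
          refine ⟨vis5, ?_, hok5, hrel5⟩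
          have hscal : per + count_sides mp rn cn + pvPerim mp q2.2 + pvPerim mp q3.2 + pvPerim mp q4.2 + pvPerim mp q5.2
              = per + pvPerim mp ((((([] ++ [(rn, cn)]) ++ q2.2) ++ q3.2) ++ q4.2) ++ q5.2) := by
            simp only [perim_append, List.nil_append]
            have hone : pvPerim mp [(rn, cn)] = count_sides mp rn cn := by
              simp [pvPerim]
            rw [hone]
            ring
          exact hBstep.trans (he2.trans (he3.trans (he4.trans (he5.trans
            (congrArg (flood mp mp.length (mp.headD []).length st vis5) hscal)))))

-- one grid-scan step (one cell) preserves the A/B relation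
lemma cell_step (mp : List (List Int)) (r c : Nat) (hr : r < mp.length) (hc : c < (mp.headD []).length)
    (stA : List (List Bool) × List (List (Nat × Nat))) (stB : PySem.Set (Int × Int) × List Int)
    (hok : GridOk mp.length (mp.headD []).length stA.1)
    (hrel : VisRel mp.length (mp.headD []).length stA.1 stB.1)
    (hlist : stB.2 = stA.2.map (fun i => pvPerim mp i)) :
    GridOk mp.length (mp.headD []).length
      (if pvIdx mp r c = 1 ∧ pvGetVis stA.1 r c = false then
        ((search_adjacent mp mp.length (mp.headD []).length (mp.length * (mp.headD []).length + 1) (r : Int) (c : Int) stA.1 []).1,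
         stA.2 ++ [(search_adjacent mp mp.length (mp.headD []).length (mp.length * (mp.headD []).length + 1) (r : Int) (c : Int) stA.1 []).2])
      else stA).1
    ∧ VisRel mp.length (mp.headD []).length
      (if pvIdx mp r c = 1 ∧ pvGetVis stA.1 r c = false then
        ((search_adjacent mp mp.length (mp.headD []).length (mp.length * (mp.headD []).length + 1) (r : Int) (c : Int) stA.1 []).1,
         stA.2 ++ [(search_adjacent mp mp.length (mp.headD []).length (mp.length * (mp.headD []).length + 1) (r : Int) (c : Int) stA.1 []).2])
      else stA).1
      (if pvIdx mp r c = 1 ∧ PySem.Set.contains stB.1 ((r : Int), (c : Int)) = false then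
        ((flood mp mp.length (mp.headD []).length [((r : Int), (c : Int))] stB.1 0).1,
         stB.2 ++ [(flood mp mp.length (mp.headD []).length [((r : Int), (c : Int))] stB.1 0).2])
      else stB).1
    ∧ (if pvIdx mp r c = 1 ∧ PySem.Set.contains stB.1 ((r : Int), (c : Int)) = false then
        ((flood mp mp.length (mp.headD []).length [((r : Int), (c : Int))] stB.1 0).1,
         stB.2 ++ [(flood mp mp.length (mp.headD []).length [((r : Int), (c : Int))] stB.1 0).2])
      else stB).2
      = ((if pvIdx mp r c = 1 ∧ pvGetVis stA.1 r c = false then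
        ((search_adjacent mp mp.length (mp.headD []).length (mp.length * (mp.headD []).length + 1) (r : Int) (c : Int) stA.1 []).1,
         stA.2 ++ [(search_adjacent mp mp.length (mp.headD []).length (mp.length * (mp.headD []).length + 1) (r : Int) (c : Int) stA.1 []).2])
      else stA).2.map (fun i => pvPerim mp i)) := by
  have hgeq : (PySem.Set.contains stB.1 ((r : Int), (c : Int)) = false) ↔ (pvGetVis stA.1 r c = false) := by
    rw [hrel r hr c hc]
  by_cases hg : pvIdx mp r c = 1 ∧ pvGetVis stA.1 r c = false
  · rw [if_pos hg, if_pos ⟨hg.1, hgeq.mpr hg.2⟩]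
    obtain ⟨vis', he, hok', hrel'⟩ := bisim mp (mp.length * (mp.headD []).length + 1) stA.1 stB.1 hok hrel
      (by have := freeG_le mp.length (mp.headD []).length stA.1; omega)
      (r : Int) (c : Int) [] 0
    have hfl : flood mp mp.length (mp.headD []).length [((r : Int), (c : Int))] stB.1 0
        = (vis', 0 + pvPerim mp (search_adjacent mp mp.length (mp.headD []).length
            (mp.length * (mp.headD []).length + 1) (r : Int) (c : Int) stA.1 []).2) := by
      rw [he, flood]
    rw [hfl]
    refine ⟨hok', hrel', ?_⟩
    rw [hlist]
    simp
  · rw [if_neg hg, if_neg (fun hcon => hg ⟨hcon.1, hgeq.mp hcon.2⟩)]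
    exact ⟨hok, hrel, hlist⟩

-- ===== VERDICT (by name: the statement is the Claim_ definition above) =====
theorem max_island_perimeter_spec : Claim_equal_max_island_perimeter := by
  intro mp hdom hpre
  show max_island_perimeter mp = max_island_perimeter_alt mp
  by_cases hne : mp = []
  · subst hne; rfl
  · unfold max_island_perimeter max_island_perimeter_alt find_islands
    rw [if_neg hne, if_neg hne]
    dsimp only
    have hperim : (fun (acc : List Int) (i : List (Nat × Nat)) =>
        acc ++ [List.foldl (fun cnt j => cnt + count_sides mp j.1 j.2) 0 i])
        = (fun acc i => acc ++ [pvPerim mp i]) := rfl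
    rw [hperim, PySem.List.foldl_append_singleton_eq_map (fun i => pvPerim mp i)]
    have hmain := foldl_rel
      (fun (a : List (List Bool) × List (List (Nat × Nat))) (b : PySem.Set (Int × Int) × List Int) =>
        GridOk mp.length (mp.headD []).length a.1 ∧
        VisRel mp.length (mp.headD []).length a.1 b.1 ∧
        b.2 = a.2.map (fun i => pvPerim mp i))
      (fun st r =>
        (List.range (mp.headD []).length).foldl (fun (st : List (List Bool) × List (List (Nat × Nat))) c =>
          if pvIdx mp r c = 1 ∧ pvGetVis st.1 r c = false then
            let p := search_adjacent mp mp.length (mp.headD []).length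
              (mp.length * (mp.headD []).length + 1) (r : Int) (c : Int) st.1 []
            (p.1, st.2 ++ [p.2])
          else st) st)
      (fun st r =>
        (List.range (mp.headD []).length).foldl (fun (st : PySem.Set (Int × Int) × List Int) c =>
          if pvIdx mp r c = 1 ∧ PySem.Set.contains st.1 ((r : Int), (c : Int)) = false then
            let p := flood mp mp.length (mp.headD []).length [((r : Int), (c : Int))] st.1 0
            (p.1, st.2 ++ [p.2])
          else st) st)
      (List.range mp.length)
      (List.replicate mp.length (List.replicate (mp.headD []).length false), [])
      (PySem.Set.empty, [])
      ?_ ?_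
    · obtain ⟨-, -, hlist⟩ := hmain
      rw [hlist]
      simp only [List.nil_append]
    · refine ⟨?_, ?_, rfl⟩
      · constructor
        · simp
        · intro row hrow
          rw [List.eq_of_mem_replicate hrow]
          simp
      · intro r' hr' c' hc'
        have hzv : pvGetVis (List.replicate mp.length (List.replicate (mp.headD []).length false)) r' c' = false := by
          simp [pvGetVis, List.getD_eq_getElem?_getD, List.getElem?_replicate, hr']
          split_ifs <;> rfl
        rw [hzv]
        rfl
    · intro a' b' r hrmem hrel'
      have hr : r < mp.length := List.mem_range.mp hrmem
      refine foldl_rel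
        (fun (a : List (List Bool) × List (List (Nat × Nat))) (b : PySem.Set (Int × Int) × List Int) =>
          GridOk mp.length (mp.headD []).length a.1 ∧
          VisRel mp.length (mp.headD []).length a.1 b.1 ∧
          b.2 = a.2.map (fun i => pvPerim mp i))
        _ _ (List.range (mp.headD []).length) a' b' hrel' ?_
      intro a'' b'' c hcmem hrel''
      have hc : c < (mp.headD []).length := List.mem_range.mp hcmem
      exact cell_step mp r c hr hc a'' b'' hrel''.1 hrel''.2.1 hrel''.2.2
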